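-- pv_equiv track=rewrite | github.com/vincenzorm117/CCI_6edition | problems/chapter16/15_master_mind/python/solution.py | scorePoints
-- ===== SOURCE A (Python) =====
-- def scorePoints(A, G, options):
--     optionToIndex = {}
--     for index in range(len(options)):
--         optionToIndex[options[index]] = index
--
--     optionCounts = [0] * len(options)
--
--     hitCount, pseudoHitCount = 0, 0
--     for i in range(len(options)):
--         if A[i] == G[i]:
--             hitCount += 1
--         else:
--             index = optionToIndex[A[i]]
--             if optionCounts[index] < 0:
--                 pseudoHitCount += 1
--             optionCounts[index] += 1
--
--             index = optionToIndex[G[i]]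
--             if optionCounts[index] > 0:
--                 pseudoHitCount += 1
--             optionCounts[index] -= 1
--
--     return (hitCount, pseudoHitCount)
-- ===== SOURCE B (Python) =====
-- def scorePoints(A, G, options):
--     hits = 0
--     freqA = {c: 0 for c in options}
--     freqG = {c: 0 for c in options}
--     for i in range(len(options)):
--         a, g = A[i], G[i]
--         if a == g:
--             hits += 1
--         else:
--             freqA[a] = freqA[a] + 1
--             freqG[g] = freqG[g] + 1
--     pseudo = 0
--     for c in freqA:
--         pseudo += min(freqA[c], freqG[c])
--     return (hits, pseudo)
-- ===== Notes on version B (the rewrite author's own statement) =====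
-- stated objective: alternative
-- what changed: A scores pseudo-hits incrementally with a signed per-color balance array updated and tested at each mismatched position; B counts hits, builds two per-color frequency tables over the mismatched positions, and returns sum over distinct colors of min(freqA, freqG).
import Mathlib
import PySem

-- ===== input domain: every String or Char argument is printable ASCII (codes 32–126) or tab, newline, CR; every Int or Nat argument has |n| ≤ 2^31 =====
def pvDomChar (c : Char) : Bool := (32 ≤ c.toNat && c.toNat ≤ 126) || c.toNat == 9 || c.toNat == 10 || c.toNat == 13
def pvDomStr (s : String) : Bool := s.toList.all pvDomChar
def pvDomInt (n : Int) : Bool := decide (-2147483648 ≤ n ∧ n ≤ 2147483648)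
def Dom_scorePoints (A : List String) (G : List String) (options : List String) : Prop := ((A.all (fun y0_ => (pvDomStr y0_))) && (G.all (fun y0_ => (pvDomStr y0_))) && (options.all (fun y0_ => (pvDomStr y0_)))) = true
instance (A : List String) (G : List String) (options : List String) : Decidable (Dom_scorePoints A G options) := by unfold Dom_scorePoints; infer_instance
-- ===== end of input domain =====

-- B replaces A's incremental signed-balance matching by hit counting plus two per-color
-- frequency tables summed with min per distinct color (objective: alternative decomposition).

-- ===== PORT A =====
-- Literal port of A. Python raises IndexError when len(A)/len(G) < len(options) and
-- KeyError when a mismatched color is not in options; both are excluded by Pre_ below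
-- (the '.getD' defaults are only reached outside Pre_).
def scorePoints (A : List String) (G : List String) (options : List String) : Int × Int :=
  let optionToIndex : PySem.Dict String Int :=
    (PySem.List.pyRange 0 (options.length : Int) 1).foldl
      (fun d index => d.insert (PySem.List.pyGetD options index "") index) PySem.Dict.empty
  let optionCounts : List Int := List.replicate options.length 0
  let st :=
    (PySem.List.pyRange 0 (options.length : Int) 1).foldl
      (fun (s : List Int × Int × Int) i =>
        if PySem.List.pyGetD A i "" = PySem.List.pyGetD G i "" then
          (s.1, s.2.1 + 1, s.2.2)
        else
          let index1 := (optionToIndex.get? (PySem.List.pyGetD A i "")).getD 0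
          let p1 := if PySem.List.pyGetD s.1 index1 0 < 0 then s.2.2 + 1 else s.2.2
          let c1 := PySem.List.pySetD s.1 index1 (PySem.List.pyGetD s.1 index1 0 + 1)
          let index2 := (optionToIndex.get? (PySem.List.pyGetD G i "")).getD 0
          let p2 := if 0 < PySem.List.pyGetD c1 index2 0 then p1 + 1 else p1
          let c2 := PySem.List.pySetD c1 index2 (PySem.List.pyGetD c1 index2 0 - 1)
          (c2, s.2.1, p2))
      (optionCounts, (0 : Int), (0 : Int))
  (st.2.1, st.2.2)

-- ===== PORT B =====
-- Literal port of Source B (same exception surface as A, excluded by Pre_).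
def scorePoints_alt (A : List String) (G : List String) (options : List String) : Int × Int :=
  let freqA0 : PySem.Dict String Int := options.foldl (fun d c => d.insert c 0) PySem.Dict.empty
  let freqG0 : PySem.Dict String Int := options.foldl (fun d c => d.insert c 0) PySem.Dict.empty
  let st :=
    (PySem.List.pyRange 0 (options.length : Int) 1).foldl
      (fun (s : Int × PySem.Dict String Int × PySem.Dict String Int) i =>
        let a := PySem.List.pyGetD A i ""
        let g := PySem.List.pyGetD G i ""
        if a = g then (s.1 + 1, s.2.1, s.2.2)
        else (s.1, s.2.1.insert a (s.2.1.getD a 0 + 1), s.2.2.insert g (s.2.2.getD g 0 + 1)))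
      ((0 : Int), freqA0, freqG0)
  let pseudo := st.2.1.keys.foldl (fun t c => t + min (st.2.1.getD c 0) (st.2.2.getD c 0)) 0
  (st.1, pseudo)

-- ===== PRECONDITION & SPEC =====
-- Pre_ excludes exactly the inputs where Python A raises: IndexError (a code shorter than
-- options) or KeyError (a mismatched-position color missing from options).
def Pre_scorePoints (A : List String) (G : List String) (options : List String) : Prop :=
  options.length ≤ A.length ∧ options.length ≤ G.length ∧
  ∀ i < options.length, A.getD i "" ≠ G.getD i "" →
    A.getD i "" ∈ options ∧ G.getD i "" ∈ options

instance (A : List String) (G : List String) (options : List String) : Decidable (Pre_scorePoints A G options) := by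
  unfold Pre_scorePoints; infer_instance

def pvWitness_scorePoints : List String × List String × List String :=
  (["R", "G"], ["G", "G"], ["R", "G"])

def Spec_scorePoints (A : List String) (G : List String) (options : List String) (out : Int × Int) : Prop := out = scorePoints_alt A G options
instance (A : List String) (G : List String) (options : List String) (out : Int × Int) : Decidable (Spec_scorePoints A G options out) := by unfold Spec_scorePoints; infer_instance

-- ===== CLAIM (what is proved, stated in full; the proofs are below) =====
def Claim_equal_scorePoints : Prop := ∀ (A : List String) (G : List String) (options : List String), Dom_scorePoints A G options → Pre_scorePoints A G options → Spec_scorePoints A G options (scorePoints A G options)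

-- ===== LEMMAS AND PROOFS =====

-- Named forms of the two loop bodies and loop prefixes (proof-only helpers).
def o2iOf (options : List String) : PySem.Dict String Int :=
  (PySem.List.pyRange 0 (options.length : Int) 1).foldl
    (fun d index => d.insert (PySem.List.pyGetD options index "") index) PySem.Dict.empty

def stepA (o2i : PySem.Dict String Int) (A G : List String) (s : List Int × Int × Int) (i : Int) :
    List Int × Int × Int :=
  if PySem.List.pyGetD A i "" = PySem.List.pyGetD G i "" then
    (s.1, s.2.1 + 1, s.2.2)
  else
    let index1 := (o2i.get? (PySem.List.pyGetD A i "")).getD 0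
    let p1 := if PySem.List.pyGetD s.1 index1 0 < 0 then s.2.2 + 1 else s.2.2
    let c1 := PySem.List.pySetD s.1 index1 (PySem.List.pyGetD s.1 index1 0 + 1)
    let index2 := (o2i.get? (PySem.List.pyGetD G i "")).getD 0
    let p2 := if 0 < PySem.List.pyGetD c1 index2 0 then p1 + 1 else p1
    let c2 := PySem.List.pySetD c1 index2 (PySem.List.pyGetD c1 index2 0 - 1)
    (c2, s.2.1, p2)

def stA (A G options : List String) (k : Nat) : List Int × Int × Int :=
  (PySem.List.pyRange 0 (k : Int) 1).foldl (stepA (o2iOf options) A G)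
    (List.replicate options.length 0, (0 : Int), (0 : Int))

def stepB (A G : List String) (s : Int × PySem.Dict String Int × PySem.Dict String Int) (i : Int) :
    Int × PySem.Dict String Int × PySem.Dict String Int :=
  let a := PySem.List.pyGetD A i ""
  let g := PySem.List.pyGetD G i ""
  if a = g then (s.1 + 1, s.2.1, s.2.2)
  else (s.1, s.2.1.insert a (s.2.1.getD a 0 + 1), s.2.2.insert g (s.2.2.getD g 0 + 1))

def freq0 (options : List String) : PySem.Dict String Int :=
  options.foldl (fun d c => d.insert c 0) PySem.Dict.empty

def stB (A G options : List String) (k : Nat) : Int × PySem.Dict String Int × PySem.Dict String Int :=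
  (PySem.List.pyRange 0 (k : Int) 1).foldl (stepB A G) ((0 : Int), freq0 options, freq0 options)

theorem scorePoints_eq (A G options : List String) :
    scorePoints A G options
      = ((stA A G options options.length).2.1, (stA A G options options.length).2.2) := rfl

theorem scorePoints_alt_eq (A G options : List String) :
    scorePoints_alt A G options
      = ((stB A G options options.length).1,
         (stB A G options options.length).2.1.keys.foldl
           (fun t c => t + min ((stB A G options options.length).2.1.getD c 0)
                               ((stB A G options options.length).2.2.getD c 0)) 0) := rfl

theorem stA_succ (A G options : List String) (k : Nat) :
    stA A G options (k + 1) = stepA (o2iOf options) A G (stA A G options k) (k : Int) := by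
  unfold stA
  have hcast : ((k + 1 : Nat) : Int) = (k : Int) + 1 := by push_cast; ring
  rw [hcast, PySem.List.pyRange_one_succ_right (by positivity), List.foldl_append,
    List.foldl_cons, List.foldl_nil]

theorem stB_succ (A G options : List String) (k : Nat) :
    stB A G options (k + 1) = stepB A G (stB A G options k) (k : Int) := by
  unfold stB
  have hcast : ((k + 1 : Nat) : Int) = (k : Int) + 1 := by push_cast; ring
  rw [hcast, PySem.List.pyRange_one_succ_right (by positivity), List.foldl_append,
    List.foldl_cons, List.foldl_nil]

theorem stA_zero (A G options : List String) :
    stA A G options 0 = (List.replicate options.length 0, (0 : Int), (0 : Int)) := by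
  unfold stA
  rw [show ((0 : Nat) : Int) = 0 from rfl, PySem.List.pyRange_one_eq_nil le_rfl, List.foldl_nil]

theorem stB_zero (A G options : List String) :
    stB A G options 0 = ((0 : Int), freq0 options, freq0 options) := by
  unfold stB
  rw [show ((0 : Nat) : Int) = 0 from rfl, PySem.List.pyRange_one_eq_nil le_rfl, List.foldl_nil]

-- the index dictionary maps each key to an in-range position holding that key
theorem o2i_build_spec (options : List String) (m : Nat) (c : String) (i : Int)
    (h : ((PySem.List.pyRange 0 (m : Int) 1).foldl
        (fun d index => d.insert (PySem.List.pyGetD options index "") index)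
        PySem.Dict.empty).get? c = some i) :
    0 ≤ i ∧ i < (m : Int) ∧ PySem.List.pyGetD options i "" = c := by
  induction m with
  | zero =>
    rw [show ((0 : Nat) : Int) = 0 from rfl, PySem.List.pyRange_one_eq_nil le_rfl,
      List.foldl_nil, PySem.Dict.get?_empty] at h
    exact absurd h (by simp)
  | succ m ih =>
    have hcast : ((m + 1 : Nat) : Int) = (m : Int) + 1 := by push_cast; ring
    rw [hcast, PySem.List.pyRange_one_succ_right (by positivity), List.foldl_append,
      List.foldl_cons, List.foldl_nil, PySem.Dict.get?_insert] at h
    split at h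
    · rename_i hc
      obtain rfl : (m : Int) = i := by injection h
      refine ⟨by positivity, by omega, hc ▸ rfl⟩
    · obtain ⟨h1, h2, h3⟩ := ih h
      exact ⟨h1, by omega, h3⟩

theorem o2iOf_spec (options : List String) (c : String) (i : Int)
    (h : (o2iOf options).get? c = some i) :
    0 ≤ i ∧ i < (options.length : Int) ∧ PySem.List.pyGetD options i "" = c :=
  o2i_build_spec options options.length c i h

theorem o2iOf_isSome (options : List String) (c : String) (hc : c ∈ options) :
    ∃ i, (o2iOf options).get? c = some i := by
  rcases hi : (o2iOf options).get? c with _ | i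
  · exfalso
    rw [PySem.Dict.get?_eq_none_iff_not_mem_keys] at hi
    apply hi
    unfold o2iOf
    rw [PySem.Dict.keys_foldl_insert_key]
    have hmap : (PySem.List.pyRange 0 (options.length : Int) 1).map
        (fun index => PySem.List.pyGetD options index "") = options :=
      PySem.List.map_pyGetD_pyRange_zero' options ""
    rw [hmap, PySem.Dict.keys_empty, PySem.Set.update_nil_left]
    exact (PySem.Set.mem_ofList options c).mpr hc
  · exact ⟨i, rfl⟩

-- the frequency dictionaries start at zero with keys = the distinct options
theorem getD_freq_build (l : List String) (d : PySem.Dict String Int)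
    (h : ∀ c, d.getD c 0 = 0) (x : String) :
    (l.foldl (fun d c => d.insert c 0) d).getD x 0 = 0 := by
  induction l generalizing d with
  | nil => exact h x
  | cons c t ih =>
    rw [List.foldl_cons]
    exact ih (d.insert c 0) (fun c' => by rw [PySem.Dict.getD_insert]; split <;> simp [h])

theorem getD_freq0 (options : List String) (x : String) : (freq0 options).getD x 0 = 0 :=
  getD_freq_build options PySem.Dict.empty (fun c => PySem.Dict.getD_empty c 0) x

theorem keys_freq0 (options : List String) : (freq0 options).keys = PySem.Set.ofList options := by
  unfold freq0
  rw [PySem.Dict.keys_foldl_insert, PySem.Dict.keys_empty, PySem.Set.update_nil_left]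

-- changing a sum of a function over a duplicate-free list at one point
theorem sum_map_update_point (K : List String) (hK : K.Nodup) (a : String) (ha : a ∈ K)
    (F F' : String → Int) (hne : ∀ c, c ≠ a → F' c = F c) :
    (K.map F').sum = (K.map F).sum + (F' a - F a) := by
  induction K with
  | nil => cases ha
  | cons x t ih =>
    rcases List.nodup_cons.mp hK with ⟨hxt, ht⟩
    rcases List.mem_cons.mp ha with rfl | hat
    · have : t.map F' = t.map F :=
        List.map_congr_left (fun c hc => hne c (fun h => hxt (h ▸ hc)))
      simp only [List.map_cons, List.sum_cons, this]; ring
    · have hxa : x ≠ a := fun h => hxt (h ▸ hat)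
      simp only [List.map_cons, List.sum_cons, hne x hxa, ih ht hat]; ring

-- the main loop invariant
theorem pyGetD_replicate_zero (n : Nat) (j : Int) :
    PySem.List.pyGetD (List.replicate n (0 : Int)) j 0 = 0 := by
  by_cases h : PySem.Raise.InRange (List.replicate n (0 : Int)).length j
  · exact List.eq_of_mem_replicate (PySem.List.pyGetD_mem _ 0 h)
  · exact PySem.List.pyGetD_of_none _ _ _ ((PySem.List.pyGet?_eq_none_iff _ _).mpr h)

theorem loop_invariant (A G options : List String)
    (_hA : options.length ≤ A.length) (_hG : options.length ≤ G.length)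
    (hm : ∀ i < options.length, A.getD i "" ≠ G.getD i "" →
      A.getD i "" ∈ options ∧ G.getD i "" ∈ options)
    (k : Nat) (hk : k ≤ options.length) :
    (stA A G options k).1.length = options.length ∧
    (stA A G options k).2.1 = (stB A G options k).1 ∧
    (∀ c ∈ options, ∀ j : Int, (o2iOf options).get? c = some j →
      PySem.List.pyGetD (stA A G options k).1 j 0
        = (stB A G options k).2.1.getD c 0 - (stB A G options k).2.2.getD c 0) ∧
    ((stA A G options k).2.2
      = ((PySem.Set.ofList options).map
          (fun c => min ((stB A G options k).2.1.getD c 0) ((stB A G options k).2.2.getD c 0))).sum) ∧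
    (stB A G options k).2.1.keys = PySem.Set.ofList options ∧
    (stB A G options k).2.2.keys = PySem.Set.ofList options := by
  induction k with
  | zero =>
    rw [stA_zero, stB_zero]
    refine ⟨List.length_replicate, rfl, ?_, ?_, keys_freq0 options, keys_freq0 options⟩
    · intro c _ j _
      simp [pyGetD_replicate_zero, getD_freq0]
    · simp [getD_freq0]
  | succ k ih =>
    have hk' : k ≤ options.length := Nat.le_of_succ_le hk
    obtain ⟨ihlen, ihhit, ihbal, ihsum, ihkA, ihkG⟩ := ih hk'
    have hklt : k < options.length := hk
    rw [stA_succ, stB_succ]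
    simp only [stepA, stepB, PySem.List.pyGetD_natCast A k "", PySem.List.pyGetD_natCast G k ""]
    by_cases hag : A.getD k "" = G.getD k ""
    · rw [if_pos hag, if_pos hag]
      exact ⟨ihlen, by rw [ihhit], ihbal, ihsum, ihkA, ihkG⟩
    · rw [if_neg hag, if_neg hag]
      obtain ⟨ha, hg⟩ := hm k hklt hag
      obtain ⟨ia, hia⟩ := o2iOf_isSome options _ ha
      obtain ⟨hia0, hialt, hiaopt⟩ := o2iOf_spec options _ ia hia
      obtain ⟨na, rfl⟩ : ∃ m : Nat, ia = (m : Int) := ⟨ia.toNat, (Int.toNat_of_nonneg hia0).symm⟩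
      obtain ⟨ig, hig⟩ := o2iOf_isSome options _ hg
      obtain ⟨hig0, higlt, higopt⟩ := o2iOf_spec options _ ig hig
      obtain ⟨ng, rfl⟩ : ∃ m : Nat, ig = (m : Int) := ⟨ig.toNat, (Int.toNat_of_nonneg hig0).symm⟩
      rw [hia, hig]
      simp only [Option.getD_some]
      have hnalt : na < options.length := by exact_mod_cast hialt
      have hnglt : ng < options.length := by exact_mod_cast higlt
      have hngna : ng ≠ na := by
        intro h
        exact hag (by rw [← hiaopt, ← higopt, h])
      have hba := ihbal _ ha _ hia
      have hbg := ihbal _ hg _ hig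
      have hlenA : (stA A G options k).1.length = options.length := ihlen
      -- reading the counts list after the first write
      have e1 : ∀ v : Int, PySem.List.pyGetD
          (PySem.List.pySetD (stA A G options k).1 (na : Int) v) (ng : Int) 0
          = PySem.List.pyGetD (stA A G options k).1 (ng : Int) 0 := by
        intro v
        rw [PySem.List.pyGetD_pySetD_natCast _ na ng _ 0 (by omega)]
        exact if_neg hngna
      have hlen1 : (PySem.List.pySetD (stA A G options k).1 (na : Int)
          (PySem.List.pyGetD (stA A G options k).1 (na : Int) 0 + 1)).length
          = options.length := by rw [PySem.List.length_pySetD]; exact ihlen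
      refine ⟨?_, ihhit, ?_, ?_, ?_, ?_⟩
      · rw [PySem.List.length_pySetD, PySem.List.length_pySetD]; exact ihlen
      · -- balance invariant
        intro c hc j hj
        obtain ⟨hj0, hjlt, hjopt⟩ := o2iOf_spec options _ j hj
        obtain ⟨nj, rfl⟩ : ∃ m : Nat, j = (m : Int) := ⟨j.toNat, (Int.toNat_of_nonneg hj0).symm⟩
        rw [PySem.List.pyGetD_pySetD_natCast _ ng nj _ 0 (by omega),
          PySem.Dict.getD_insert, PySem.Dict.getD_insert, e1]
        by_cases hcg : c = G.getD k ""
        · subst hcg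
          have hnj : nj = ng := by
            have := hig.symm.trans hj
            exact_mod_cast (Option.some.inj this).symm
          subst hnj
          simp only [if_true,
            if_neg (show ¬(G.getD k "" = A.getD k "") from fun h => hag h.symm)]
          rw [hbg]; ring
        · have hnjng : nj ≠ ng := by
            intro h
            exact hcg (by rw [← hjopt, ← higopt, h])
          rw [if_neg hnjng, if_neg hcg,
            PySem.List.pyGetD_pySetD_natCast _ na nj _ 0 (by omega)]
          by_cases hca : c = A.getD k ""
          · subst hca
            have hnj : nj = na := by
              have := hia.symm.trans hj
              exact_mod_cast (Option.some.inj this).symm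
            subst hnj
            simp only [if_true]
            rw [hba]; ring
          · have hnjna : nj ≠ na := by
              intro h
              exact hca (by rw [← hjopt, ← hiaopt, h])
            rw [if_neg hnjna, if_neg hca]
            exact ihbal c hc _ hj
      · -- pseudo-hit sum invariant
        have hKnd := PySem.Set.nodup_ofList options
        have haK : A.getD k "" ∈ PySem.Set.ofList options := (PySem.Set.mem_ofList _ _).mpr ha
        have hgK : G.getD k "" ∈ PySem.Set.ofList options := (PySem.Set.mem_ofList _ _).mpr hg
        have step2 := sum_map_update_point (PySem.Set.ofList options) hKnd (G.getD k "") hgK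
          (fun c => min (((stB A G options k).2.1.insert (A.getD k "")
              ((stB A G options k).2.1.getD (A.getD k "") 0 + 1)).getD c 0)
            ((stB A G options k).2.2.getD c 0))
          (fun c => min (((stB A G options k).2.1.insert (A.getD k "")
              ((stB A G options k).2.1.getD (A.getD k "") 0 + 1)).getD c 0)
            (((stB A G options k).2.2.insert (G.getD k "")
              ((stB A G options k).2.2.getD (G.getD k "") 0 + 1)).getD c 0))
          (by
            intro c hc
            simp only [PySem.Dict.getD_insert, if_neg hc])
        have step1 := sum_map_update_point (PySem.Set.ofList options) hKnd (A.getD k "") haK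
          (fun c => min ((stB A G options k).2.1.getD c 0) ((stB A G options k).2.2.getD c 0))
          (fun c => min (((stB A G options k).2.1.insert (A.getD k "")
              ((stB A G options k).2.1.getD (A.getD k "") 0 + 1)).getD c 0)
            ((stB A G options k).2.2.getD c 0))
          (by
            intro c hc
            simp only [PySem.Dict.getD_insert, if_neg hc])
        rw [step2, step1, ← ihsum]
        simp only [e1, hba, hbg, PySem.Dict.getD_insert, if_true,
          if_neg (show ¬(G.getD k "" = A.getD k "") from fun h => hag h.symm)]
        split_ifs <;> omega
      · rw [PySem.Dict.keys_insert_of_contains _ _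
          ((PySem.Dict.contains_iff_mem_keys _ _).mpr (ihkA ▸ (PySem.Set.mem_ofList _ _).mpr ha))]
        exact ihkA
      · rw [PySem.Dict.keys_insert_of_contains _ _
          ((PySem.Dict.contains_iff_mem_keys _ _).mpr (ihkG ▸ (PySem.Set.mem_ofList _ _).mpr hg))]
        exact ihkG

-- ===== VERDICT (by name: the statement is the Claim_ definition above) =====
theorem scorePoints_spec : Claim_equal_scorePoints := by
  intro A G options _hdom hpre
  obtain ⟨hA, hG, hm⟩ := hpre
  obtain ⟨hlen, hhit, _hbal, hsum, hkA, _hkG⟩ :=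
    loop_invariant A G options hA hG hm options.length le_rfl
  unfold Spec_scorePoints
  rw [scorePoints_eq, scorePoints_alt_eq]
  refine Prod.ext hhit ?_
  simp only
  simp only [PySem.List.foldl_add]
  rw [hkA, hsum]; ring
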